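-- pv_equiv track=rewrite | github.com/696GrocuttT/AppDaemon | apps/power.py | mergeSeries
-- ===== SOURCE A (Python) =====
-- def mergeSeries(series):
--     mergedSeries = []
--     if series:
--         valueIdxList = list(range(2, len(series[0])))
--     for item in series:
--         # If we already have an item in the merged list, and the last item of that list
--         # has an end time that matches the start time of the new item. Merge them.
--         if mergedSeries and mergedSeries[-1][1] == item[0]:
--             updatedElement = [mergedSeries[-1][0], item[1]]
--             for idx in valueIdxList:
--                 updatedElement.append(mergedSeries[-1][idx] + item[idx])
--             mergedSeries[-1] = tuple(updatedElement)
--         else: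
--             mergedSeries.append(item)
--     return mergedSeries
-- ===== SOURCE B (Python) =====
-- def mergeSeries(series):
--     # Two-phase: partition into maximal adjacent runs, then reduce each run.
--     if not series:
--         return []
--     valueIdxList = list(range(2, len(series[0])))
--     runs = []
--     current = [series[0]]
--     for item in series[1:]:
--         if current[-1][1] == item[0]:
--             current.append(item)
--         else:
--             runs.append(current)
--             current = [item]
--     runs.append(current)
--     result = []
--     for run in runs:
--         if len(run) == 1:
--             result.append(run[0])
--         else:
--             merged = [run[0][0], run[-1][1]]
--             for idx in valueIdxList:
--                 merged.append(sum(item[idx] for item in run))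
--             result.append(tuple(merged))
--     return result
-- ===== Notes on version B (the rewrite author's own statement) =====
-- stated objective: alternative
-- what changed: B replaces A's single-pass in-place rewriting of the output's last element by a two-phase decomposition: first partition the series into maximal adjacent runs (item start == previous item end), then reduce each run (singleton runs emit the original row, longer runs emit [start, end, column sums]).
-- outside the precondition, e.g. on mergeSeries([(0, 1, 2), (1, 0, 0), (1, 2)]): A returns [(0, 0, 2), (1, 2)], B returns [(0, 0, 2), (1, 2)]
import Mathlib
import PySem

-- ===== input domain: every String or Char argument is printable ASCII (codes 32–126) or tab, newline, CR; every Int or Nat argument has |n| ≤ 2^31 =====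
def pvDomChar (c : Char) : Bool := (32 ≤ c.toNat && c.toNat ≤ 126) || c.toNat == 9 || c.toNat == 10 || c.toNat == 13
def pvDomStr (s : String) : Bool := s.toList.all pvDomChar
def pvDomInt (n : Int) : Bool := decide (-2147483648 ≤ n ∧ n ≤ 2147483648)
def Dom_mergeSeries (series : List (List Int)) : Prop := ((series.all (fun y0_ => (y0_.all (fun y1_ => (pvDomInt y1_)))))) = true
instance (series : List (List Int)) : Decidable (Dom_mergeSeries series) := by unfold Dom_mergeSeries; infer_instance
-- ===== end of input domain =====

-- B replaces A's single-pass in-place merging by a two-phase decomposition (partition into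
-- adjacent runs, then reduce each run); same asymptotic cost, proved to return the same list.


-- ===== PORT A =====
-- Python computes valueIdxList only when series is nonempty; on empty series the loop body
-- never runs, so hoisting the (pure) range computation is behaviourally identical.
def mergeSeries (series : List (List Int)) : List (List Int) :=
  let valueIdxList : List Int := PySem.List.pyRange 2 ((series.headD []).length : Int) 1
  series.foldl
    (fun mergedSeries item =>
      if mergedSeries ≠ [] ∧
          PySem.List.pyGetD (PySem.List.pyGetD mergedSeries (-1) []) 1 0 =
            PySem.List.pyGetD item 0 0 then
        let last := PySem.List.pyGetD mergedSeries (-1) ([] : List Int)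
        let updatedElement :=
          valueIdxList.foldl
            (fun u idx => u ++ [PySem.List.pyGetD last idx 0 + PySem.List.pyGetD item idx 0])
            [PySem.List.pyGetD last 0 0, PySem.List.pyGetD item 1 0]
        mergedSeries.dropLast ++ [updatedElement]
      else mergedSeries ++ [item])
    []

-- ===== PORT B =====
def mergeSeries_alt (series : List (List Int)) : List (List Int) :=
  match series with
  | [] => []
  | s0 :: rest =>
    let valueIdxList : List Int := PySem.List.pyRange 2 (s0.length : Int) 1
    let st := rest.foldl
      (fun (st : List (List (List Int)) × List (List Int)) item =>
        if PySem.List.pyGetD (PySem.List.pyGetD st.2 (-1) []) 1 0 =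
            PySem.List.pyGetD item 0 0 then
          (st.1, st.2 ++ [item])
        else (st.1 ++ [st.2], [item]))
      ([], [s0])
    let runs := st.1 ++ [st.2]
    runs.foldl
      (fun result run =>
        if run.length = 1 then result ++ [run.headD []]
        else
          result ++
            [valueIdxList.foldl
              (fun merged idx =>
                merged ++ [(run.map (fun item => PySem.List.pyGetD item idx 0)).sum])
              [PySem.List.pyGetD (run.headD []) 0 0,
               PySem.List.pyGetD (PySem.List.pyGetD run (-1) []) 1 0]])
      []

-- ===== PRECONDITION & SPEC =====
-- A raises IndexError whenever an adjacency comparison or a merge reaches a row shorter than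
-- the indices it uses; Pre_ admits the natural domain (uniform row width ≥ 2, or trivial
-- shapes where no out-of-range access can happen).  Pre_ is slightly narrower than A's exact
-- returning set: A also returns on some ragged series whose DATA happen never to trigger an
-- out-of-range merge; B returns the same value there (see claim cites), but whether A raises
-- on such shapes depends on the values, not the shape, so they are excluded.
def Pre_mergeSeries (series : List (List Int)) : Prop :=
  series.length ≤ 1 ∨
  ((∀ r ∈ series, r.length = (series.headD []).length) ∧ 2 ≤ (series.headD []).length) ∨
  ((series.headD []).length = 2 ∧ ∀ r ∈ series, 2 ≤ r.length) ∨
  (∀ p ∈ series.zip series.tail,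
    2 ≤ p.1.length ∧ 1 ≤ p.2.length ∧ p.1.getD 1 0 ≠ p.2.getD 0 0)
instance (series : List (List Int)) : Decidable (Pre_mergeSeries series) := by
  unfold Pre_mergeSeries; infer_instance
def pvWitness_mergeSeries : List (List Int) := [[0, 1, 5], [1, 2, 7], [3, 4, 1]]
def Spec_mergeSeries (series : List (List Int)) (out : List (List Int)) : Prop := out = mergeSeries_alt series
instance (series : List (List Int)) (out : List (List Int)) : Decidable (Spec_mergeSeries series out) := by unfold Spec_mergeSeries; infer_instance

-- ===== CLAIM (what is proved, stated in full; the proofs are below) =====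
def Claim_equal_mergeSeries : Prop := ∀ (series : List (List Int)), Dom_mergeSeries series → Pre_mergeSeries series → Spec_mergeSeries series (mergeSeries series)

-- ===== LEMMAS AND PROOFS =====

-- The column sum of a run at index idx (B's inner sum).
def colSum (run : List (List Int)) (idx : Int) : Int :=
  (run.map (fun item => PySem.List.pyGetD item idx 0)).sum

-- B's reduction of one run.
def reduceRun (L0 : Int) (run : List (List Int)) : List Int :=
  if run.length = 1 then run.headD []
  else
    [PySem.List.pyGetD (run.headD []) 0 0,
     PySem.List.pyGetD (PySem.List.pyGetD run (-1) []) 1 0] ++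
      (PySem.List.pyRange 2 L0 1).map (fun idx => colSum run idx)

-- B's run partition, as structural recursion.
def runsOf : List (List Int) → List (List Int) → List (List (List Int))
  | cur, [] => [cur]
  | cur, item :: rest =>
    if PySem.List.pyGetD (PySem.List.pyGetD cur (-1) []) 1 0 =
        PySem.List.pyGetD item 0 0 then
      runsOf (cur ++ [item]) rest
    else cur :: runsOf [item] rest

theorem B_partition_eq_runsOf (rest : List (List Int)) :
    ∀ (runs : List (List (List Int))) (cur : List (List Int)),
      (rest.foldl
          (fun (st : List (List (List Int)) × List (List Int)) item =>
            if PySem.List.pyGetD (PySem.List.pyGetD st.2 (-1) []) 1 0 =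
                PySem.List.pyGetD item 0 0 then
              (st.1, st.2 ++ [item])
            else (st.1 ++ [st.2], [item]))
          (runs, cur)).1 ++
        [(rest.foldl
          (fun (st : List (List (List Int)) × List (List Int)) item =>
            if PySem.List.pyGetD (PySem.List.pyGetD st.2 (-1) []) 1 0 =
                PySem.List.pyGetD item 0 0 then
              (st.1, st.2 ++ [item])
            else (st.1 ++ [st.2], [item]))
          (runs, cur)).2] = runs ++ runsOf cur rest := by
  induction rest with
  | nil => intro runs cur; simp [runsOf]
  | cons item rest ih =>
    intro runs cur
    simp only [List.foldl_cons, runsOf]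
    by_cases hc : PySem.List.pyGetD (PySem.List.pyGetD cur (-1) []) 1 0 =
        PySem.List.pyGetD item 0 0
    · dsimp only
      rw [if_pos hc, if_pos hc]
      exact ih runs (cur ++ [item])
    · dsimp only
      rw [if_neg hc, if_neg hc, ih (runs ++ [cur]) [item]]
      simp

theorem reduceRun_singleton (L0 : Int) (x : List Int) : reduceRun L0 [x] = x := by
  simp [reduceRun]

-- B's reduce fold equals mapping reduceRun.
theorem B_reduce_eq_map (L0 : Int) (runs : List (List (List Int))) :
    ∀ (acc : List (List Int)),
      runs.foldl
        (fun result run =>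
          if run.length = 1 then result ++ [run.headD []]
          else
            result ++
              [(PySem.List.pyRange 2 L0 1).foldl
                (fun merged idx =>
                  merged ++ [(run.map (fun item => PySem.List.pyGetD item idx 0)).sum])
                [PySem.List.pyGetD (run.headD []) 0 0,
                 PySem.List.pyGetD (PySem.List.pyGetD run (-1) []) 1 0]])
        acc = acc ++ runs.map (reduceRun L0) := by
  induction runs with
  | nil => intro acc; simp
  | cons run runs ih =>
    intro acc
    rw [List.foldl_cons, ih]
    have hbody : (if run.length = 1 then acc ++ [run.headD []]
        else
          acc ++
            [(PySem.List.pyRange 2 L0 1).foldl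
              (fun merged idx =>
                merged ++ [(run.map (fun item => PySem.List.pyGetD item idx 0)).sum])
              [PySem.List.pyGetD (run.headD []) 0 0,
               PySem.List.pyGetD (PySem.List.pyGetD run (-1) []) 1 0]])
        = acc ++ [reduceRun L0 run] := by
      unfold reduceRun
      split_ifs with h
      · rfl
      · rw [PySem.List.foldl_append_singleton_eq_map]
        simp [colSum]
    rw [hbody]
    simp

-- index 1 of a reduced run = index 1 of the run's last original row
theorem reduceRun_getD_one (L0 : Int) (cur : List (List Int)) (hcur : cur ≠ []) :
    PySem.List.pyGetD (reduceRun L0 cur) 1 0 =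
      PySem.List.pyGetD (PySem.List.pyGetD cur (-1) []) 1 0 := by
  unfold reduceRun
  split
  · rename_i h1
    match cur, h1 with
    | [x], _ =>
      rw [PySem.List.pyGetD_neg_one [x] [] (by simp)]
      simp
  · simp [PySem.List.pyGetD_ofNat']

-- index 0 of a reduced run = index 0 of the run's first row
theorem reduceRun_getD_zero (L0 : Int) (cur : List (List Int)) (hcur : cur ≠ []) :
    PySem.List.pyGetD (reduceRun L0 cur) 0 0 =
      PySem.List.pyGetD (cur.headD []) 0 0 := by
  unfold reduceRun
  split
  · rename_i h1
    match cur, h1 with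
    | [x], _ => simp
  · simp [PySem.List.pyGetD_zero_cons]

-- indexing a two-element prefix followed by a mapped range
theorem getD_two_prefix_map_range (a b : Int) (f : Int → Int) (L0 idx : Int)
    (h2 : 2 ≤ idx) (hL : idx < L0) :
    PySem.List.pyGetD ([a, b] ++ (PySem.List.pyRange 2 L0 1).map f) idx 0 = f idx := by
  have hlen : ([a, b] ++ (PySem.List.pyRange 2 L0 1).map f).length = 2 + (L0 - 2).toNat := by
    simp [PySem.List.length_pyRange_one]; omega
  rw [PySem.List.pyGetD_eq_getElem _ _ (by omega) (by rw [hlen]; push_cast; omega)]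
  rw [List.getElem_append_right (by simp; omega)]
  rw [List.getElem_map, PySem.List.getElem_pyRange_one]
  congr 1
  simp
  omega

-- index idx (2 ≤ idx < L0) of a reduced run is the run's column sum at idx
theorem reduceRun_getD_idx (L0 : Int) (cur : List (List Int)) (hcur : cur ≠ [])
    (idx : Int) (h2 : 2 ≤ idx) (hL : idx < L0) :
    PySem.List.pyGetD (reduceRun L0 cur) idx 0 = colSum cur idx := by
  unfold reduceRun
  split
  · rename_i h1
    match cur, h1 with
    | [x], _ =>
      simp only [List.headD_cons, colSum, List.map_cons, List.map_nil, List.sum_cons,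
        List.sum_nil, add_zero]
  · exact getD_two_prefix_map_range _ _ (fun i => colSum cur i) L0 idx h2 hL

theorem headD_append_singleton (cur : List (List Int)) (x : List Int) (hcur : cur ≠ []) :
    (cur ++ [x]).headD [] = cur.headD [] := by
  cases cur with
  | nil => exact absurd rfl hcur
  | cons a t => simp

theorem colSum_append_singleton (cur : List (List Int)) (x : List Int) (idx : Int) :
    colSum (cur ++ [x]) idx = colSum cur idx + PySem.List.pyGetD x idx 0 := by
  simp [colSum]

-- the merged row A builds from (reduceRun cur) and item equals B's reduction of cur ++ [item]
theorem merge_step (L0 : Int) (cur : List (List Int)) (item : List Int) (hcur : cur ≠ []) :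
    [PySem.List.pyGetD (reduceRun L0 cur) 0 0, PySem.List.pyGetD item 1 0] ++
      (PySem.List.pyRange 2 L0 1).map (fun idx =>
        PySem.List.pyGetD (reduceRun L0 cur) idx 0 + PySem.List.pyGetD item idx 0) =
    reduceRun L0 (cur ++ [item]) := by
  have hlen : ¬ (cur ++ [item]).length = 1 := by
    cases cur with
    | nil => exact absurd rfl hcur
    | cons a t => simp
  conv_rhs => rw [reduceRun]
  rw [if_neg hlen]
  congr 1
  · rw [reduceRun_getD_zero L0 cur hcur, headD_append_singleton cur item hcur,
      PySem.List.pyGetD_neg_one_append_singleton]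
  · apply List.map_congr_left
    intro idx hidx
    rw [PySem.List.mem_pyRange_one] at hidx
    rw [reduceRun_getD_idx L0 cur hcur idx hidx.1 hidx.2, colSum_append_singleton]

-- Main invariant: A's fold over the remaining items, started from an output whose last
-- element is the reduction of the open run, produces the mapped reductions of the runs.
theorem A_key (L0 : Int) (rest : List (List Int)) :
    ∀ (out : List (List Int)) (cur : List (List Int)), cur ≠ [] →
      rest.foldl
        (fun mergedSeries item =>
          if mergedSeries ≠ [] ∧
              PySem.List.pyGetD (PySem.List.pyGetD mergedSeries (-1) []) 1 0 =
                PySem.List.pyGetD item 0 0 then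
            mergedSeries.dropLast ++
              [(PySem.List.pyRange 2 L0 1).foldl
                (fun u idx =>
                  u ++ [PySem.List.pyGetD (PySem.List.pyGetD mergedSeries (-1) ([] : List Int)) idx 0 +
                    PySem.List.pyGetD item idx 0])
                [PySem.List.pyGetD (PySem.List.pyGetD mergedSeries (-1) ([] : List Int)) 0 0,
                 PySem.List.pyGetD item 1 0]]
          else mergedSeries ++ [item])
        (out ++ [reduceRun L0 cur])
      = out ++ (runsOf cur rest).map (reduceRun L0) := by
  induction rest with
  | nil => intro out cur hcur; simp [runsOf]
  | cons item rest ih =>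
    intro out cur hcur
    simp only [List.foldl_cons, runsOf]
    by_cases hc : PySem.List.pyGetD (PySem.List.pyGetD cur (-1) []) 1 0 =
        PySem.List.pyGetD item 0 0
    · rw [if_pos hc,
        if_pos (⟨by simp, by rw [PySem.List.pyGetD_neg_one_append_singleton,
          reduceRun_getD_one L0 cur hcur]; exact hc⟩)]
      rw [List.dropLast_concat]
      rw [PySem.List.pyGetD_neg_one_append_singleton,
        PySem.List.foldl_append_singleton_eq_map, merge_step L0 cur item hcur]
      exact ih out (cur ++ [item]) (by simp)
    · rw [if_neg hc,
        if_neg (fun h => hc (by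
          rw [PySem.List.pyGetD_neg_one_append_singleton,
            reduceRun_getD_one L0 cur hcur] at h
          exact h.2))]
      have h1 := ih (out ++ [reduceRun L0 cur]) [item] (by simp)
      rw [reduceRun_singleton] at h1
      rw [show out ++ [reduceRun L0 cur] ++ [item] =
            out ++ [reduceRun L0 cur] ++ [item] from rfl, h1]
      simp

-- ===== VERDICT (by name: the statement is the Claim_ definition above) =====
theorem ports_agree (series : List (List Int)) : mergeSeries series = mergeSeries_alt series := by
  cases series with
  | nil => rfl
  | cons s0 rest =>
    have hB : mergeSeries_alt (s0 :: rest) =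
        (runsOf [s0] rest).map (reduceRun (s0.length : Int)) := by
      simp only [mergeSeries_alt]
      rw [B_partition_eq_runsOf rest [] [s0], B_reduce_eq_map]
      simp
    have hA : mergeSeries (s0 :: rest) =
        (runsOf [s0] rest).map (reduceRun (s0.length : Int)) := by
      simp only [mergeSeries, List.headD_cons, List.foldl_cons]
      rw [if_neg (by simp)]
      have h1 := A_key (s0.length : Int) rest [] [s0] (by simp)
      rw [reduceRun_singleton] at h1
      simpa using h1
    rw [hA, hB]

theorem mergeSeries_spec : Claim_equal_mergeSeries := by
  intro series _ _
  unfold Spec_mergeSeries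
  exact ports_agree series
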